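-- pv_equiv track=rewrite | github.com/Davidsaav3/Minho-Clusters | src/execution/06_comparacion_if.py | secuencia_info
-- ===== SOURCE A (Python) =====
-- def secuencia_info(series):
--     """Cuenta secuencias consecutivas de 1s y devuelve la cantidad y longitud máxima."""
--     in_seq = False
--     count_seq = 0
--     max_len = 0
--     current_len = 0
--     for v in series:
--         if v == 1:
--             current_len += 1
--             if not in_seq:
--                 count_seq += 1
--                 in_seq = True
--         else:
--             in_seq = False
--             current_len = 0
--         if current_len > max_len:
--             max_len = current_len
--     return count_seq, max_len
-- ===== SOURCE B (Python) =====
-- def secuencia_info(series):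
--     """Cuenta secuencias consecutivas de 1s y devuelve la cantidad y longitud máxima."""
--     lengths = []
--     i, n = 0, len(series)
--     while i < n:
--         if series[i] == 1:
--             j = i
--             while j < n and series[j] == 1:
--                 j += 1
--             lengths.append(j - i)
--             i = j
--         else:
--             i += 1
--     return len(lengths), max(lengths, default=0)
-- ===== Notes on version B (the rewrite author's own statement) =====
-- stated objective: alternative
-- what changed: B splits the series into maximal runs of 1s (inner scan per run) and collects their lengths, answering with len(lengths) and max(lengths, default=0), instead of A's single pass with in_seq/count/current/max state flags.
import Mathlib
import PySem

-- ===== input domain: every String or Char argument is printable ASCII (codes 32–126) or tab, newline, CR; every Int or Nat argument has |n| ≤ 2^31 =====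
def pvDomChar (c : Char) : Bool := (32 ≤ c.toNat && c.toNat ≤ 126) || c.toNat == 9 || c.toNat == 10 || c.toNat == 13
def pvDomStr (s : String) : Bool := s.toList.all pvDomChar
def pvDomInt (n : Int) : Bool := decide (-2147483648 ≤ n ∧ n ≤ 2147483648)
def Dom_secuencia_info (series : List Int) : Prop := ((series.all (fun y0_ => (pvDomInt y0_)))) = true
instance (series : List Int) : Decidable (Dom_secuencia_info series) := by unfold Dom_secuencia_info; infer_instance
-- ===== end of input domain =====

-- B rewrites A's flag-based single pass as run-splitting: collect the lengths of maximal runs of 1s, then count and max them (alternative decomposition, same cost).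


-- ===== PORT A =====
def pvStep (st : Bool × Int × Int × Int) (v : Int) : Bool × Int × Int × Int :=
  match st with
  | (inSeq, cnt, mx, cur) =>
    match (if v == 1 then (true, (if inSeq then cnt else cnt + 1), cur + 1)
           else (false, cnt, (0 : Int))) with
    | (inSeq', cnt', cur') => (inSeq', cnt', (if cur' > mx then cur' else mx), cur')

def secuencia_info (series : List Int) : Int × Int :=
  let st := series.foldl pvStep (false, 0, 0, 0)
  (st.2.1, st.2.2.1)

-- ===== PORT B =====
-- run-length collector: the outer while loop of Source B; the inner while over consecutive 1s is takeWhile/dropWhile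
def pvRuns (series : List Int) : List Int :=
  match series with
  | [] => []
  | v :: rest =>
    if v == 1 then
      ((1 : Int) + ((rest.takeWhile (fun x => x == 1)).length : Int))
        :: pvRuns (rest.dropWhile (fun x => x == 1))
    else pvRuns rest
termination_by series.length
decreasing_by
  · simpa using Nat.lt_succ_of_le (rest.length_dropWhile_le _)
  · simp

def secuencia_info_alt (series : List Int) : Int × Int :=
  let lengths := pvRuns series
  ((lengths.length : Int), PySem.List.maxD lengths (fun y => y) 0)

-- ===== PRECONDITION & SPEC =====
def Spec_secuencia_info (series : List Int) (out : Int × Int) : Prop := out = secuencia_info_alt series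
instance (series : List Int) (out : Int × Int) : Decidable (Spec_secuencia_info series out) := by unfold Spec_secuencia_info; infer_instance

-- ===== CLAIM (what is proved, stated in full; the proofs are below) =====
def Claim_equal_secuencia_info : Prop := ∀ (series : List Int), Dom_secuencia_info series → Spec_secuencia_info series (secuencia_info series)

-- ===== LEMMAS AND PROOFS =====
def pvOut (st : Bool × Int × Int × Int) : Int × Int := (st.2.1, st.2.2.1)

lemma pvStep_one (inSeq : Bool) (cnt mx cur : Int) :
    pvStep (inSeq, cnt, mx, cur) 1 = (true, if inSeq then cnt else cnt + 1, max mx (cur + 1), cur + 1) := by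
  simp only [pvStep, BEq.rfl, if_true, Prod.mk.injEq, true_and, and_true]
  omega

lemma pvStep_ne (v : Int) (h : ¬ v = 1) (inSeq : Bool) (cnt mx cur : Int) :
    pvStep (inSeq, cnt, mx, cur) v = (false, cnt, max mx 0, 0) := by
  simp only [pvStep, beq_iff_eq, h, if_false, Prod.mk.injEq, true_and, and_true]
  omega

lemma pvFoldlMaxInit (l : List Int) : ∀ a b : Int, l.foldl max (max a b) = max a (l.foldl max b) := by
  induction l with
  | nil => intro a b; simp
  | cons x t ih =>
    intro a b
    simp only [List.foldl_cons, max_assoc]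
    exact ih a (max b x)

lemma pvRunsPos (s : List Int) : ∀ x ∈ pvRuns s, 1 ≤ x := by
  induction s using pvRuns.induct with
  | case1 => simp [pvRuns]
  | case2 v rest h ih =>
    simp only [pvRuns, h, if_true, List.mem_cons]
    rintro x (rfl | hx)
    · have : (0 : Int) ≤ ((rest.takeWhile (fun x => x == 1)).length : Int) := Int.natCast_nonneg _
      omega
    · exact ih x hx
  | case3 v rest h ih =>
    simpa only [pvRuns, h, if_false] using ih

-- mid-run state: the loop reduces to the run-boundary state
lemma pvL2 (s : List Int) : ∀ cnt mx cur : Int, 1 ≤ cur → cur ≤ mx →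
    pvOut (s.foldl pvStep (true, cnt, mx, cur))
      = pvOut ((s.dropWhile (fun x => x == 1)).foldl pvStep
          (false, cnt, max mx (cur + ((s.takeWhile (fun x => x == 1)).length : Int)), 0)) := by
  induction s with
  | nil =>
    intro cnt mx cur h1 h2
    simp [pvOut, max_eq_left h2]
  | cons v rest ih =>
    intro cnt mx cur h1 h2
    by_cases hv : v = 1
    · subst hv
      have hT : (0 : Int) ≤ ((rest.takeWhile (fun x => x == 1)).length : Int) := Int.natCast_nonneg _
      simp only [List.foldl_cons, pvStep_one, if_true, List.takeWhile_cons, List.dropWhile_cons,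
        BEq.rfl, List.length_cons]
      rw [ih cnt (max mx (cur + 1)) (cur + 1) (by omega) (le_max_right _ _)]
      have e : max (max mx (cur + 1)) (cur + 1 + ((rest.takeWhile (fun x => x == 1)).length : Int))
          = max mx (cur + (((rest.takeWhile (fun x => x == 1)).length + 1 : Nat) : Int)) := by
        push_cast; omega
      rw [e]
    · simp only [List.foldl_cons, pvStep_ne v hv, List.takeWhile_cons, List.dropWhile_cons,
        beq_iff_eq, hv, if_false, List.length_nil, Nat.cast_zero, add_zero]
      have e1 : max mx (0 : Int) = mx := by omega
      have e2 : max mx cur = mx := by omega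
      simp [e1, e2]

-- from a run boundary, the loop computes the run-length summary
lemma pvL1 (s : List Int) : ∀ cnt mx : Int, 0 ≤ mx →
    pvOut (s.foldl pvStep (false, cnt, mx, 0))
      = (cnt + ((pvRuns s).length : Int), max mx ((pvRuns s).foldl max 0)) := by
  induction s using pvRuns.induct with
  | case1 => intro cnt mx h; simp [pvOut, pvRuns, max_eq_left h]
  | case2 v rest h ih =>
    intro cnt mx hmx
    have hv : v = 1 := by simpa [beq_iff_eq] using h
    subst hv
    have hT : (0 : Int) ≤ ((rest.takeWhile (fun x => x == 1)).length : Int) := Int.natCast_nonneg _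
    have hM := (PySem.List.le_foldl_max (pvRuns (rest.dropWhile (fun x => x == 1))) 0).1
    simp only [List.foldl_cons, pvStep_one, if_false, Bool.false_eq_true]
    rw [pvL2 rest (cnt + 1) (max mx (0 + 1)) (0 + 1) (by omega) (le_max_right _ _)]
    rw [ih (cnt + 1) _ (le_max_of_le_right (by omega))]
    simp only [pvRuns, BEq.rfl, if_true, List.length_cons, List.foldl_cons]
    refine Prod.ext ?_ ?_
    · show cnt + 1 + _ = cnt + _
      push_cast
      ring
    · show max (max (max mx (0 + 1)) (0 + 1 + _)) _ = max mx _
      set T := ((rest.takeWhile (fun x => x == 1)).length : Int) with hTdef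
      have e : max (0:Int) (1 + T) = max (1 + T) 0 := by omega
      rw [e, pvFoldlMaxInit]
      set M := (pvRuns (rest.dropWhile (fun x => x == 1))).foldl max 0 with hMdef
      omega
  | case3 v rest h ih =>
    intro cnt mx hmx
    have hv : ¬ v = 1 := by simpa [beq_iff_eq] using h
    simp only [List.foldl_cons, pvStep_ne v hv]
    rw [max_eq_left hmx, ih cnt mx hmx]
    simp [pvRuns, beq_iff_eq, hv]

lemma pvMaxDFold (l : List Int) (hpos : ∀ x ∈ l, 1 ≤ x) :
    PySem.List.maxD l (fun y => y) 0 = l.foldl max 0 := by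
  cases l with
  | nil => rfl
  | cons a t =>
    have ha : (1 : Int) ≤ a := hpos a (by simp)
    rw [PySem.List.maxD, PySem.List.max?_id_cons, Option.getD_some, List.foldl_cons,
        max_eq_right (by omega : (0:Int) ≤ a)]

-- ===== VERDICT (by name: the statement is the Claim_ definition above) =====
theorem secuencia_info_spec : Claim_equal_secuencia_info := by
  intro series _
  show secuencia_info series = secuencia_info_alt series
  have hM := (PySem.List.le_foldl_max (pvRuns series) 0).1
  simp only [secuencia_info, secuencia_info_alt]
  have h := pvL1 series 0 0 le_rfl
  simp only [pvOut] at h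
  rw [h, pvMaxDFold _ (pvRunsPos series)]
  simp [max_eq_right hM]
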